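-- pv_equiv track=rewrite | github.com/shahpranshu27/Python-DSA | practice_14_book_fair.py | unplacedBooks
-- ===== SOURCE A (Python) =====
-- def unplacedBooks(books, shelf):
--     # i, j = 0, 0
--     # n = len(books)
--     # m = len(shelf)
--
--     # unplaced_books = 0
--
--     # while i < n and j < m:
--     #     if shelf[j] >= books[i]:
--     #         i+=1
--     #         j+=1
--
--     #     elif shelf[j] < books[i]:
--     #         j+=1
--     #     # else:
--     #     #     j-=1
--
--     # unplaced_books = n - i
--
--     # return unplaced_books
--
--     n = len(books)
--     used = [False] * n
--     unplaced_books = 0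
--
--     for book in books:
--         placed = False # initially book is unplaced, so False
--         for i in range(n):
--             if not used[i] and shelf[i] >= book:
--                 used[i] = True # mark True if shelf is used
--                 placed = True # mark True if book is placed
--                 break
--
--         if not placed:
--             unplaced_books += 1
--
--     return unplaced_books
-- ===== SOURCE B (Python) =====
-- def unplacedBooks(books, shelf):
--     # Different state: instead of a fixed used[] mask scanned over range(n),
--     # keep the shrinking list of still-free shelf capacities (A only ever
--     # looks at the first len(books) shelves) and remove the first fitting one.
--     free = shelf[:len(books)]
--     unplaced = 0
--     for b in books:
--         k = next((j for j, c in enumerate(free) if c >= b), None)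
--         if k is None:
--             unplaced += 1
--         else:
--             free.pop(k)
--     return unplaced
-- ===== Notes on version B (the rewrite author's own statement) =====
-- stated objective: alternative
-- what changed: B drops A's boolean used[] mask and fixed range(n) rescans: it keeps the shrinking list of still-free shelf capacities (the first len(books) shelves, the only ones A ever inspects) and for each book finds-and-removes the first fitting capacity, so placed shelves are never revisited.
import Mathlib
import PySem

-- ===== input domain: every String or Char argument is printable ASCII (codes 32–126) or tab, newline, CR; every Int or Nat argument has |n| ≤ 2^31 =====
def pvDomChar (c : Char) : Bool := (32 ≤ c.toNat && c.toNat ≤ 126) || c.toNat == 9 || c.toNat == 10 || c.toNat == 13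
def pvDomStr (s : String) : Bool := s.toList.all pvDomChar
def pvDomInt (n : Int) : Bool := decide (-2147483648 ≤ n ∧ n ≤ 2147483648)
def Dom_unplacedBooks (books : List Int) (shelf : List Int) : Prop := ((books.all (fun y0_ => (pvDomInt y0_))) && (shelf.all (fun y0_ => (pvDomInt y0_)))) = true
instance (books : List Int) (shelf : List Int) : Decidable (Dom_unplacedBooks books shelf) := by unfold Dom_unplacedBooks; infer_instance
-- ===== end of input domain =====

-- B replaces A's used[] mask + full range(n) rescan per book by a shrinking list of
-- still-free shelf capacities (find-and-remove the first fitting one); same greedy result.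

-- ===== PORT A =====
-- inner 'for i in range(n): if not used[i] and shelf[i] >= book: used[i]=True; break'
-- (shelf[i] raises IndexError when i ≥ len(shelf); Pre_ excludes exactly those runs, so
--  pyGetD's default 0 is never read inside Pre_)
def aInner (shelf : List Int) (book : Int) : List Nat → List Bool → List Bool × Bool
  | [], used => (used, false)
  | i :: rest, used =>
    match !used.getD i false && decide (PySem.List.pyGetD shelf (i : Int) 0 ≥ book) with
    | true => (used.set i true, true)
    | false => aInner shelf book rest used

def unplacedBooks (books : List Int) (shelf : List Int) : Int :=
  let n := books.length
  (books.foldl (fun (st : List Bool × Int) book =>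
      let r := aInner shelf book (List.range n) st.1
      if r.2 then (r.1, st.2) else (r.1, st.2 + 1))
    (List.replicate n false, 0)).2

-- ===== PORT B =====
-- next((j for j, c in enumerate(free) if c >= b), None)
def findGe : List Int → Int → Option Nat
  | [], _ => none
  | c :: rest, b => if c ≥ b then some 0 else (findGe rest b).map (· + 1)

def unplacedBooks_alt (books : List Int) (shelf : List Int) : Int :=
  (books.foldl (fun (st : List Int × Int) b =>
      match findGe st.1 b with
      | none => (st.1, st.2 + 1)
      | some k => (st.1.eraseIdx k, st.2))
    (PySem.List.slice shelf none (some (books.length : Int)), 0)).2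

-- ===== PRECONDITION & SPEC =====
-- Exactly where the Python A returns: with a non-empty books list and fewer shelves than
-- books, A's inner loop always reaches an index ≥ len(shelf) and raises IndexError.
def Pre_unplacedBooks (books : List Int) (shelf : List Int) : Prop :=
  books = [] ∨ books.length ≤ shelf.length
instance (books : List Int) (shelf : List Int) : Decidable (Pre_unplacedBooks books shelf) := by
  unfold Pre_unplacedBooks; infer_instance

def pvWitness_unplacedBooks : List Int × List Int := ([2, 1], [1, 3])

def Spec_unplacedBooks (books : List Int) (shelf : List Int) (out : Int) : Prop := out = unplacedBooks_alt books shelf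
instance (books : List Int) (shelf : List Int) (out : Int) : Decidable (Spec_unplacedBooks books shelf out) := by unfold Spec_unplacedBooks; infer_instance

-- ===== CLAIM (what is proved, stated in full; the proofs are below) =====
def Claim_equal_unplacedBooks : Prop := ∀ (books : List Int) (shelf : List Int), Dom_unplacedBooks books shelf → Pre_unplacedBooks books shelf → Spec_unplacedBooks books shelf (unplacedBooks books shelf)

-- ===== LEMMAS AND PROOFS =====

-- the still-free capacities: entries of cs at the positions where us is false
def maskFree : List Bool → List Int → List Int
  | u :: us, c :: cs => if u then maskFree us cs else c :: maskFree us cs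
  | _, _ => []

theorem maskFree_replicate : ∀ (cs : List Int), maskFree (List.replicate cs.length false) cs = cs := by
  intro cs; induction cs with
  | nil => rfl
  | cons c cs ih => simp [maskFree, List.replicate, ih]

-- A's inner loop is a find? over the index list
theorem aInner_eq_find (shelf : List Int) (b : Int) :
    ∀ (idxs : List Nat) (used : List Bool),
      aInner shelf b idxs used =
        match idxs.find? (fun i => !used[i]?.getD false && decide (b ≤ shelf[i]?.getD 0)) with
        | some i => (used.set i true, true)
        | none => (used, false) := by
  intro idxs used
  induction idxs with
  | nil => rfl
  | cons i rest ih =>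
    rw [List.find?_cons]
    have hcond : (!used.getD i false && decide (PySem.List.pyGetD shelf (i : Int) 0 ≥ b))
        = (!used[i]?.getD false && decide (b ≤ shelf[i]?.getD 0)) := by
      simp [List.getD]
    cases h : (!used[i]?.getD false && decide (b ≤ shelf[i]?.getD 0)) with
    | true => simp only [aInner, hcond, h]
    | false => simp only [aInner, hcond, h]; exact ih

-- the heart: A's scan over range n and B's find-and-remove on the free list correspond
theorem find_range_rel (b : Int) :
    ∀ (us : List Bool) (shelf : List Int), us.length ≤ shelf.length →
      ((List.range us.length).find? (fun i => !us[i]?.getD false && decide (b ≤ shelf[i]?.getD 0)) = none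
          ∧ findGe (maskFree us (shelf.take us.length)) b = none)
      ∨ (∃ i k,
          (List.range us.length).find? (fun i => !us[i]?.getD false && decide (b ≤ shelf[i]?.getD 0)) = some i
          ∧ findGe (maskFree us (shelf.take us.length)) b = some k
          ∧ maskFree (us.set i true) (shelf.take us.length)
              = (maskFree us (shelf.take us.length)).eraseIdx k) := by
  intro us
  induction us with
  | nil => intro shelf _; left; simp [maskFree, findGe]
  | cons u us ih =>
    intro shelf hlen
    match shelf with
    | [] => simp at hlen
    | c :: cs =>
      have hlen' : us.length ≤ cs.length := by simpa using hlen
      have hcomp : ((fun i => !(u :: us)[i]?.getD false && decide (b ≤ (c :: cs)[i]?.getD 0)) ∘ Nat.succ)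
          = (fun i => !us[i]?.getD false && decide (b ≤ cs[i]?.getD 0)) :=
        funext (fun i => rfl)
      rw [List.length_cons, List.range_succ_eq_map, List.take_succ_cons, List.find?_cons,
        List.find?_map, hcomp]
      cases u with
      | true =>
        simp only [List.getElem?_cons_zero, Option.getD_some, Bool.not_true, Bool.false_and,
          maskFree, if_pos]
        rcases ih cs hlen' with ⟨hfa, hfb⟩ | ⟨i, k, hfa, hfb, hmask⟩
        · left; rw [hfa]; exact ⟨rfl, hfb⟩
        · right
          refine ⟨i + 1, k, by rw [hfa]; rfl, hfb, ?_⟩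
          simpa [List.set_cons_succ, maskFree] using hmask
      | false =>
        simp only [List.getElem?_cons_zero, Option.getD_some, Bool.not_false, Bool.true_and,
          maskFree, Bool.false_eq_true, if_false]
        by_cases hc : b ≤ c
        · right
          refine ⟨0, 0, by simp [hc], by simp [findGe, ge_iff_le, hc], ?_⟩
          simp [List.set_cons_zero, maskFree]
        · simp only [hc, decide_false]
          rcases ih cs hlen' with ⟨hfa, hfb⟩ | ⟨i, k, hfa, hfb, hmask⟩
          · left
            constructor
            · rw [hfa]; rfl
            · simp [findGe, ge_iff_le, hc, hfb]
          · right
            refine ⟨i + 1, k + 1, by rw [hfa]; rfl, by simp [findGe, ge_iff_le, hc, hfb], ?_⟩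
            simp [List.set_cons_succ, maskFree, List.eraseIdx_cons_succ, hmask]

-- outer fold invariant: B's free list is the mask of A's used flags over the first n shelves
theorem fold_rel (shelf : List Int) (n : Nat) (hns : n ≤ shelf.length) :
    ∀ (bs : List Int) (used : List Bool) (free : List Int) (cnt : Int),
      used.length = n → free = maskFree used (shelf.take n) →
      (bs.foldl (fun (st : List Bool × Int) book =>
          let r := aInner shelf book (List.range n) st.1
          if r.2 then (r.1, st.2) else (r.1, st.2 + 1)) (used, cnt)).2
      = (bs.foldl (fun (st : List Int × Int) b =>
          match findGe st.1 b with
          | none => (st.1, st.2 + 1)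
          | some k => (st.1.eraseIdx k, st.2)) (free, cnt)).2 := by
  intro bs
  induction bs with
  | nil => intro used free cnt _ _; rfl
  | cons b bs ih =>
    intro used free cnt hul hfree
    have hle : used.length ≤ shelf.length := by omega
    have h := find_range_rel b used shelf hle
    rw [hul] at h
    simp only [List.foldl_cons]
    rcases h with ⟨hfa, hfb⟩ | ⟨i, k, hfa, hfb, hmask⟩
    · rw [aInner_eq_find, hfa]
      rw [hfree] at *
      rw [hfb]
      exact ih used _ (cnt + 1) hul rfl
    · rw [aInner_eq_find, hfa]
      rw [hfree] at *
      rw [hfb]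
      exact ih (used.set i true) _ cnt (by simpa using hul) (by simpa using hmask.symm)

-- ===== VERDICT (by name: the statement is the Claim_ definition above) =====
theorem unplacedBooks_spec : Claim_equal_unplacedBooks := by
  intro books shelf _ hpre
  unfold Spec_unplacedBooks unplacedBooks unplacedBooks_alt
  rcases hpre with rfl | hle
  · rfl
  · rw [PySem.List.slice_to shelf (by positivity)]
    simp only [Int.toNat_natCast]
    apply fold_rel shelf books.length hle books (List.replicate books.length false)
      _ 0 (by simp)
    have h1 : (shelf.take books.length).length = books.length := by simp [hle]
    have h2 := maskFree_replicate (shelf.take books.length)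
    rw [h1] at h2
    exact h2.symm
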